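-- pv_equiv track=rewrite | github.com/ericmharris/gc3-query | gc3_query/opt/reference/psmcli/opaascli/utils.py | get_response_header_with_no_auth
-- ===== SOURCE A (Python) =====
-- from collections import OrderedDict
--
-- def get_response_header_with_no_auth(headers):
--
--     if headers is not None:
--         dict_header = OrderedDict(headers)
--         for param in ['cloud_auth_token', 'Authorization', 'cloud_pwd']:
--             if param in dict_header:
--                 del dict_header[param]
--         return dict_header
--     # if nothing to delete return the default.
--     return headers
-- ===== SOURCE B (Python) =====
-- from collections import OrderedDict
--
-- def get_response_header_with_no_auth(headers):
--     if headers is None: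
--         return headers
--     bad = {'cloud_auth_token', 'Authorization', 'cloud_pwd'}
--     return OrderedDict((k, v) for k, v in OrderedDict(headers).items() if k not in bad)
-- ===== Notes on version B (the rewrite author's own statement) =====
-- stated objective: idiomatic
-- what changed: B replaces A's loop over the three blacklist keys with membership-tested deletions by a single filtering pass over all header entries keeping those whose key is not in the exclusion set.
import Mathlib
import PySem

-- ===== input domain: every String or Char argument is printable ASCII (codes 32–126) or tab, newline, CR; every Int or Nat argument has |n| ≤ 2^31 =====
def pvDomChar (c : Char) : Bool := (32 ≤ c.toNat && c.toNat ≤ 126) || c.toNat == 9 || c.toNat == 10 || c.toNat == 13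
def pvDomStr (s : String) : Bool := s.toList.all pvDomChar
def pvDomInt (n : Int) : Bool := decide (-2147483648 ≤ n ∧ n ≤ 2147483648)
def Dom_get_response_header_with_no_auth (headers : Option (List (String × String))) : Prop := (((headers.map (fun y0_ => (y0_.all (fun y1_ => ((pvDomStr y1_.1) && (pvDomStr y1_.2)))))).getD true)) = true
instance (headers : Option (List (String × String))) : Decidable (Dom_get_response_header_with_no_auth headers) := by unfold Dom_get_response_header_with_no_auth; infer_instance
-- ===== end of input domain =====

-- B replaces A's loop over the three blacklist keys (membership test + delete on the dict)
-- by one filtering pass over all header entries; idiomatic, same cost.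

-- ===== PORT A =====
-- A: build OrderedDict(headers), then for each of the three blacklist keys delete it if present.
def get_response_header_with_no_auth (headers : Option (List (String × String))) : Option (List (String × String)) :=
  match headers with
  | some hs =>
      let dict_header : PySem.Dict String String := PySem.Dict.ofList hs
      let dict_header :=
        (["cloud_auth_token", "Authorization", "cloud_pwd"]).foldl
          (fun d param => if d.contains param then d.erase param else d) dict_header
      some dict_header.items
  | none => none

-- ===== PORT B =====
def pvBadKeys : List String := ["cloud_auth_token", "Authorization", "cloud_pwd"]

-- B: one pass over OrderedDict(headers).items() keeping entries whose key is not in the bad set.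
def get_response_header_with_no_auth_alt (headers : Option (List (String × String))) : Option (List (String × String)) :=
  match headers with
  | some hs =>
      some ((PySem.Dict.ofList
              ((PySem.Dict.ofList hs : PySem.Dict String String).items.filter
                (fun p => !(pvBadKeys.contains p.1)))).items)
  | none => none

-- ===== PRECONDITION & SPEC =====
def Spec_get_response_header_with_no_auth (headers : Option (List (String × String))) (out : Option (List (String × String))) : Prop := out = get_response_header_with_no_auth_alt headers
instance (headers : Option (List (String × String))) (out : Option (List (String × String))) : Decidable (Spec_get_response_header_with_no_auth headers out) := by unfold Spec_get_response_header_with_no_auth; infer_instance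

-- ===== CLAIM (what is proved, stated in full; the proofs are below) =====
def Claim_equal_get_response_header_with_no_auth : Prop := ∀ (headers : Option (List (String × String))), Dom_get_response_header_with_no_auth headers → Spec_get_response_header_with_no_auth headers (get_response_header_with_no_auth headers)

-- ===== LEMMAS AND PROOFS =====

-- erasing an absent key is the identity, so A's guard can be dropped
theorem pv_if_erase (d : PySem.Dict String String) (k : String) :
    (if d.contains k then d.erase k else d) = d.erase k := by
  split_ifs with h
  · rfl
  · apply PySem.Dict.ext
    show d.items = d.items.filter _
    symm
    apply List.filter_eq_self.mpr
    intro p hp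
    simp only [Bool.not_eq_eq_eq_not, Bool.not_true]
    by_contra hc
    have : d.contains k = true := by
      simp only [PySem.Dict.contains, List.any_eq_true]
      exact ⟨p, hp, by simpa using hc⟩
    simp [this] at h

-- an ofList over a list with nodup keys reproduces that list as its items
theorem pv_items_ofList_nodup (l : List (String × String)) (h : (l.map Prod.fst).Nodup) :
    (PySem.Dict.ofList l : PySem.Dict String String).items = l := by
  show (List.foldl (fun acc p => acc.insert p.1 p.2) PySem.Dict.empty l).items = l
  have := PySem.Dict.items_foldl_insert_fresh (κ := String) (ν := String)
      l Prod.fst Prod.snd PySem.Dict.empty (by intro a _; simp [PySem.Dict.contains, PySem.Dict.empty]) h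
  simpa using this

-- ===== VERDICT (by name: the statement is the Claim_ definition above) =====
theorem get_response_header_with_no_auth_spec : Claim_equal_get_response_header_with_no_auth := by
  intro headers _
  unfold Spec_get_response_header_with_no_auth get_response_header_with_no_auth get_response_header_with_no_auth_alt
  cases headers with
  | none => rfl
  | some hs =>
      simp only [List.foldl, pv_if_erase]
      set d : PySem.Dict String String := PySem.Dict.ofList hs with hd
      have hnodup : (d.items.map Prod.fst).Nodup := by
        have := PySem.Dict.nodup_keys_ofList (κ := String) (ν := String) hs
        simpa [PySem.Dict.keys, hd] using this
      have hfil : ∀ q : String × String → Bool,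
          ((d.items.filter q).map Prod.fst).Nodup := by
        intro q
        have : (d.items.filter q).Sublist d.items := List.filter_sublist
        exact (this.map Prod.fst).nodup hnodup
      rw [pv_items_ofList_nodup _ (hfil _)]
      congr 1
      show (((d.erase "cloud_auth_token").erase "Authorization").erase "cloud_pwd").items = _
      simp only [PySem.Dict.erase, List.filter_filter]
      apply List.filter_congr
      intro p _
      by_cases h1 : p.1 = "cloud_auth_token" <;> by_cases h2 : p.1 = "Authorization" <;>
        by_cases h3 : p.1 = "cloud_pwd" <;>
        simp [pvBadKeys, h1, h2, h3]
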